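-- pv_equiv track=rewrite | github.com/syed-nazmus-sakib/Pathways | shopping_admin/evaluation/pathways_runner_evidence_based.py | verify_investigation_proof
-- ===== SOURCE A (Python) =====
-- from typing import Dict, List, Optional, Any, Tuple
--
-- def verify_investigation_proof(reasoning: str, trajectory: List[Dict]) -> Dict:
--     """
--     Verify agent actually investigated the order details.
--     """
--     urls_visited = [step.get("current_url", "") for step in trajectory]
--
--     # Must visit an order view page
--     visited_order = any("/sales/order/view/" in url for url in urls_visited)
--
--     # Must capture the content (simulated check)
--     saw_history = False
--     for step in trajectory:
--         content = step.get("page_content", "").lower()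
--         if "comments history" in content or "order total" in content:
--             saw_history = True
--             break
--
--     return {
--         "visited_order_page": visited_order,
--         "saw_history_section": saw_history,
--         "proves_investigation": visited_order and saw_history
--     }
-- ===== SOURCE B (Python) =====
-- def verify_investigation_proof(reasoning, trajectory):
--     visited_order = False
--     saw_history = False
--     for step in trajectory:
--         visited_order = visited_order or "/sales/order/view/" in step.get("current_url", "")
--         content = step.get("page_content", "").lower()
--         saw_history = saw_history or "comments history" in content or "order total" in content
--         if visited_order and saw_history:
--             break
--     return {
--         "visited_order_page": visited_order,
--         "saw_history_section": saw_history,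
--         "proves_investigation": visited_order and saw_history
--     }
-- ===== Notes on version B (the rewrite author's own statement) =====
-- stated objective: simpler
-- what changed: Replaced the url-list build plus two separate scans by one loop over trajectory maintaining both flags with an early exit once both are set; no intermediate list.
import Mathlib
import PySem

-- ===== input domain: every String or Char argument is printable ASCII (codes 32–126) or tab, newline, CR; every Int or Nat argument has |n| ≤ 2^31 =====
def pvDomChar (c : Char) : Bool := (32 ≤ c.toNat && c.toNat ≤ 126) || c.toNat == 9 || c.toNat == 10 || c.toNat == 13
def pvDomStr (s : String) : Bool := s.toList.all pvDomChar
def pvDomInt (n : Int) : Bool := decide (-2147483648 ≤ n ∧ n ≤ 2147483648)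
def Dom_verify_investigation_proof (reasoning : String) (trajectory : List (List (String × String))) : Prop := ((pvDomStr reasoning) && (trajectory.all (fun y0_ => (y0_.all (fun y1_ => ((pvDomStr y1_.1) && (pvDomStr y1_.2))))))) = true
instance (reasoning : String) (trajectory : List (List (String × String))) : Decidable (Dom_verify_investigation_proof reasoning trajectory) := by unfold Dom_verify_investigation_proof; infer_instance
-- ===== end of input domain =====

-- B collapses A's url-list build and two separate scans into one loop keeping both flags,
-- with an early exit once both are set (simpler; return value only, neither mutates input).

-- ===== PORT A =====
-- the predicate on a step's lowered page_content, as A tests it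
def pvContentHit (step : List (String × String)) : Bool :=
  let content := PySem.Str.lower ((PySem.Dict.mk step).getD "page_content" "")
  PySem.Str.isIn "comments history" content || PySem.Str.isIn "order total" content

-- A's 'for step in trajectory: … break' loop for saw_history
def pvSawLoop : List (List (String × String)) → Bool
  | [] => false
  | step :: rest => if pvContentHit step then true else pvSawLoop rest

def verify_investigation_proof (reasoning : String) (trajectory : List (List (String × String))) : List (String × Bool) :=
  let urls_visited := trajectory.map (fun step => (PySem.Dict.mk step).getD "current_url" "")
  let visited_order := urls_visited.any (fun url => PySem.Str.isIn "/sales/order/view/" url)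
  let saw_history := pvSawLoop trajectory
  [("visited_order_page", visited_order),
   ("saw_history_section", saw_history),
   ("proves_investigation", visited_order && saw_history)]

-- ===== PORT B =====
-- one pass carrying both flags, breaking once both are true
def pvScan (vo sh : Bool) : List (List (String × String)) → Bool × Bool
  | [] => (vo, sh)
  | step :: rest =>
    let vo' := vo || PySem.Str.isIn "/sales/order/view/" ((PySem.Dict.mk step).getD "current_url" "")
    let content := PySem.Str.lower ((PySem.Dict.mk step).getD "page_content" "")
    let sh' := sh || PySem.Str.isIn "comments history" content || PySem.Str.isIn "order total" content
    if vo' && sh' then (vo', sh') else pvScan vo' sh' rest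

def verify_investigation_proof_alt (reasoning : String) (trajectory : List (List (String × String))) : List (String × Bool) :=
  let r := pvScan false false trajectory
  [("visited_order_page", r.1),
   ("saw_history_section", r.2),
   ("proves_investigation", r.1 && r.2)]

-- ===== PRECONDITION & SPEC =====
def Spec_verify_investigation_proof (reasoning : String) (trajectory : List (List (String × String))) (out : List (String × Bool)) : Prop := out = verify_investigation_proof_alt reasoning trajectory
instance (reasoning : String) (trajectory : List (List (String × String))) (out : List (String × Bool)) : Decidable (Spec_verify_investigation_proof reasoning trajectory out) := by unfold Spec_verify_investigation_proof; infer_instance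

-- ===== CLAIM (what is proved, stated in full; the proofs are below) =====
def Claim_equal_verify_investigation_proof : Prop := ∀ (reasoning : String) (trajectory : List (List (String × String))), Dom_verify_investigation_proof reasoning trajectory → Spec_verify_investigation_proof reasoning trajectory (verify_investigation_proof reasoning trajectory)

-- ===== LEMMAS AND PROOFS =====
def pvUrlHit (step : List (String × String)) : Bool :=
  PySem.Str.isIn "/sales/order/view/" ((PySem.Dict.mk step).getD "current_url" "")

theorem pvSawLoop_eq_any (l : List (List (String × String))) :
    pvSawLoop l = l.any pvContentHit := by
  induction l with
  | nil => rfl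
  | cons x xs ih =>
    simp only [pvSawLoop, List.any_cons]
    split_ifs with h <;> simp [h, ih]

theorem pvScan_eq (l : List (List (String × String))) : ∀ vo sh,
    pvScan vo sh l = (vo || l.any pvUrlHit, sh || l.any pvContentHit) := by
  induction l with
  | nil => intro vo sh; simp [pvScan]
  | cons x xs ih =>
    intro vo sh
    simp only [pvScan, List.any_cons]
    split_ifs with h
    · rcases Bool.and_eq_true_iff.mp h with ⟨h1, h2⟩
      simp only [pvUrlHit, pvContentHit, Prod.mk.injEq]
      refine ⟨?_, ?_⟩
      · rw [← Bool.or_assoc, h1]; simp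
      · rw [← Bool.or_assoc, ← Bool.or_assoc, h2]; simp
    · rw [ih]
      simp only [pvUrlHit, pvContentHit]
      simp [Bool.or_assoc]

theorem pvUrlHit_def : pvUrlHit = fun step =>
    PySem.Str.isIn "/sales/order/view/" ((PySem.Dict.mk step).getD "current_url" "") := rfl

-- ===== VERDICT (by name: the statement is the Claim_ definition above) =====
theorem verify_investigation_proof_spec : Claim_equal_verify_investigation_proof := by
  intro reasoning trajectory _
  unfold Spec_verify_investigation_proof verify_investigation_proof verify_investigation_proof_alt
  simp [pvScan_eq, pvSawLoop_eq_any, pvUrlHit_def, List.any_map, Function.comp_def]
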